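-- pv_equiv track=rewrite | github.com/patni11/mysite | main/views/articles.py | change_tag
-- ===== SOURCE A (Python) =====
-- def change_tag(tags):
--     replace_tags = {'blockchain': "Crypto", 'productivity': "Productivity", 'money': "Tech", 'AR': "Tech", 'gadgets': "Tech", 'programming': "Programming",
--                     'cryptocurrency': "Crypto", 'tech': "Tech", 'defi': "Crypto", 'electronics': "Programming", 'life': 'Productivity', 'crypto': 'Crypto', 'future': "Tech"}
--
--     all_tags = []
--     for i in tags.split(','):
--         new_tag = i.replace(" ", "")
--         if new_tag in replace_tags.keys():
--             new_tag = replace_tags[new_tag]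
--             all_tags.append(new_tag)
--
--     if "Productivity" in all_tags:
--         return "Productivity"
--     elif "Programming" in all_tags:
--         return "Programming"
--     elif "Crypto" in all_tags:
--         return "Crypto"
--     elif "Tech" in all_tags:
--         return "Tech"
-- ===== SOURCE B (Python) =====
-- CATEGORIES = ["Productivity", "Programming", "Crypto", "Tech"]
--
-- TAG_RANK = {'blockchain': 2, 'productivity': 0, 'money': 3, 'AR': 3, 'gadgets': 3,
--             'programming': 1, 'cryptocurrency': 2, 'tech': 3, 'defi': 2,
--             'electronics': 1, 'life': 0, 'crypto': 2, 'future': 3}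
--
-- def change_tag(tags):
--     best = None
--     for piece in tags.split(','):
--         r = TAG_RANK.get(piece.replace(' ', ''))
--         if r is not None and (best is None or r < best):
--             best = r
--     return None if best is None else CATEGORIES[best]
-- ===== Notes on version B (the rewrite author's own statement) =====
-- stated objective: alternative
-- what changed: Replaced A's intermediate list of mapped categories followed by four sequential membership checks with a single pass that looks each stripped tag up in one tag-to-rank dict and keeps the minimum rank, indexing a category table at the end.
import Mathlib
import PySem

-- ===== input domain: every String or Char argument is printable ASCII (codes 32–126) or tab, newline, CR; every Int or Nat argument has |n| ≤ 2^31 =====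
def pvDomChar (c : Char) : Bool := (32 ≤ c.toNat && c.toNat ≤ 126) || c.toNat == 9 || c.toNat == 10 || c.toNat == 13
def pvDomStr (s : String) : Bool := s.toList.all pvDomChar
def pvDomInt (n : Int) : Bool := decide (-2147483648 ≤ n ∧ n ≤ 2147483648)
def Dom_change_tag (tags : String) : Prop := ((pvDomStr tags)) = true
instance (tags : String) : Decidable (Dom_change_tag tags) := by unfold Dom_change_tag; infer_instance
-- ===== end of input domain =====

-- B replaces A's materialized category list plus four sequential membership passes by a single
-- min-rank reduction over one tag→rank dict (objective: alternative decomposition, same cost).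

-- ===== PORT A =====
-- Python dict literal replace_tags (keys distinct, insertion order irrelevant to get?)
def replaceTags : PySem.Dict String String :=
  PySem.Dict.mk [("blockchain", "Crypto"), ("productivity", "Productivity"),
    ("money", "Tech"), ("AR", "Tech"), ("gadgets", "Tech"),
    ("programming", "Programming"), ("cryptocurrency", "Crypto"),
    ("tech", "Tech"), ("defi", "Crypto"), ("electronics", "Programming"),
    ("life", "Productivity"), ("crypto", "Crypto"), ("future", "Tech")]

-- tags.split(','): the separator is the nonempty literal ",", so split? is always `some`
-- and the `.getD []` default branch is dead; exact on every input.
def change_tag (tags : String) : Option String :=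
  let all_tags := ((PySem.Str.split? tags ",").getD []).foldl
    (fun acc i =>
      let new_tag := PySem.Str.replace i " " ""
      match replaceTags.get? new_tag with   -- `new_tag in replace_tags.keys()` + lookup
      | some c => acc ++ [c]
      | none => acc) ([] : List String)
  if all_tags.contains "Productivity" then some "Productivity"
  else if all_tags.contains "Programming" then some "Programming"
  else if all_tags.contains "Crypto" then some "Crypto"
  else if all_tags.contains "Tech" then some "Tech"
  else none

-- ===== PORT B =====
def pvCategories : List String := ["Productivity", "Programming", "Crypto", "Tech"]

def tagRank : PySem.Dict String Int :=
  PySem.Dict.mk [("blockchain", 2), ("productivity", 0),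
    ("money", 3), ("AR", 3), ("gadgets", 3),
    ("programming", 1), ("cryptocurrency", 2),
    ("tech", 3), ("defi", 2), ("electronics", 1),
    ("life", 0), ("crypto", 2), ("future", 3)]

def change_tag_alt (tags : String) : Option String :=
  let best := ((PySem.Str.split? tags ",").getD []).foldl
    (fun best piece =>
      match tagRank.get? (PySem.Str.replace piece " " "") with   -- TAG_RANK.get(...)
      | some r =>
        match best with
        | none => some r
        | some b => if r < b then some r else some b
      | none => best) (none : Option Int)
  match best with
  | none => none
  | some b => PySem.List.pyGet? pvCategories b   -- CATEGORIES[best]; b ∈ {0,1,2,3} always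

-- ===== PRECONDITION & SPEC =====
def Spec_change_tag (tags : String) (out : Option String) : Prop := out = change_tag_alt tags
instance (tags : String) (out : Option String) : Decidable (Spec_change_tag tags out) := by unfold Spec_change_tag; infer_instance

-- ===== CLAIM (what is proved, stated in full; the proofs are below) =====
def Claim_equal_change_tag : Prop := ∀ (tags : String), Dom_change_tag tags → Spec_change_tag tags (change_tag tags)

-- ===== LEMMAS AND PROOFS =====

-- rank of a category string, as a total function
def catRank (c : String) : Int :=
  if c = "Productivity" then 0 else if c = "Programming" then 1
  else if c = "Crypto" then 2 else 3

-- the loop bodies of the two ports, and A's final selection chain, as named terms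
def stepA (acc : List String) (i : String) : List String :=
  let new_tag := PySem.Str.replace i " " ""
  match replaceTags.get? new_tag with
  | some c => acc ++ [c]
  | none => acc

def stepB (best : Option Int) (piece : String) : Option Int :=
  match tagRank.get? (PySem.Str.replace piece " " "") with
  | some r =>
    match best with
    | none => some r
    | some b => if r < b then some r else some b
  | none => best

def selA (all_tags : List String) : Option String :=
  if all_tags.contains "Productivity" then some "Productivity"
  else if all_tags.contains "Programming" then some "Programming"
  else if all_tags.contains "Crypto" then some "Crypto"
  else if all_tags.contains "Tech" then some "Tech"
  else none

def catOf (best : Option Int) : Option String :=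
  match best with
  | none => none
  | some b => PySem.List.pyGet? pvCategories b

lemma change_tag_eq (tags : String) :
    change_tag tags = selA (((PySem.Str.split? tags ",").getD []).foldl stepA []) := rfl

lemma change_tag_alt_eq (tags : String) :
    change_tag_alt tags = catOf (((PySem.Str.split? tags ",").getD []).foldl stepB none) := rfl

-- the two literal dicts map the same keys, ranks = catRank of categories
lemma get?_map_snd (f : String → Int) (l : List (String × String)) (x : String) :
    (PySem.Dict.mk (l.map (fun p => (p.1, f p.2)))).get? x
      = ((PySem.Dict.mk l).get? x).map f := by
  induction l with
  | nil => simp [PySem.Dict.get?]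
  | cons hd tl ih =>
    obtain ⟨k, v⟩ := hd
    simp only [List.map_cons, PySem.Dict.get?_mk_cons, ih]
    by_cases h : (k == x) = true <;> simp [h]

lemma tagRank_eq :
    tagRank = PySem.Dict.mk (replaceTags.items.map (fun p => (p.1, catRank p.2))) := by
  rfl

lemma dicts_agree (s : String) :
    tagRank.get? s = (replaceTags.get? s).map catRank := by
  rw [tagRank_eq]
  exact get?_map_snd catRank replaceTags.items s

-- every value of replace_tags is one of the four categories
lemma value_isCat {s c : String} (h : replaceTags.get? s = some c) :
    c = "Productivity" ∨ c = "Programming" ∨ c = "Crypto" ∨ c = "Tech" := by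
  have hm := PySem.Dict.mem_items_of_get?_eq_some _ h
  simp only [replaceTags, List.mem_cons, List.not_mem_nil, or_false, Prod.mk.injEq] at hm
  rcases hm with ⟨h1,h2⟩|⟨h1,h2⟩|⟨h1,h2⟩|⟨h1,h2⟩|⟨h1,h2⟩|⟨h1,h2⟩|⟨h1,h2⟩|⟨h1,h2⟩|⟨h1,h2⟩|⟨h1,h2⟩|⟨h1,h2⟩|⟨h1,h2⟩|⟨h1,h2⟩ <;> simp [h2]

-- loop invariant relating A's accumulated category list to B's running minimum rank
def LoopInv (acc : List String) (b : Option Int) : Prop :=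
  match b with
  | none => acc = []
  | some r =>
      (∃ s ∈ acc, (s = "Productivity" ∨ s = "Programming" ∨ s = "Crypto" ∨ s = "Tech") ∧ catRank s = r)
      ∧ (∀ s ∈ acc, (s = "Productivity" ∨ s = "Programming" ∨ s = "Crypto" ∨ s = "Tech") ∧ r ≤ catRank s)

lemma inv_step (acc : List String) (b : Option Int) (i : String) (h : LoopInv acc b) :
    LoopInv (stepA acc i) (stepB b i) := by
  simp only [stepA, stepB]
  rw [dicts_agree]
  rcases hg : replaceTags.get? (PySem.Str.replace i " " "") with _ | c
  · simpa using h
  · simp only [Option.map_some]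
    have hc := value_isCat hg
    cases b with
    | none =>
      simp only [LoopInv] at h; subst h
      refine ⟨⟨c, by simp, hc, rfl⟩, ?_⟩
      intro s hs; simp at hs; subst hs; exact ⟨hc, le_refl _⟩
    | some br =>
      obtain ⟨⟨w, hw, hwcat, hwr⟩, hall⟩ := h
      by_cases hlt : catRank c < br
      · simp only [if_pos hlt]
        refine ⟨⟨c, by simp, hc, rfl⟩, ?_⟩
        intro s hs
        rcases List.mem_append.mp hs with hs | hs
        · exact ⟨(hall s hs).1, le_of_lt (lt_of_lt_of_le hlt (hall s hs).2)⟩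
        · simp at hs; subst hs; exact ⟨hc, le_refl _⟩
      · simp only [if_neg hlt]
        refine ⟨⟨w, List.mem_append.mpr (Or.inl hw), hwcat, hwr⟩, ?_⟩
        intro s hs
        rcases List.mem_append.mp hs with hs | hs
        · exact hall s hs
        · simp at hs; subst hs; exact ⟨hc, le_of_not_gt hlt⟩

lemma inv_fold (pieces : List String) (acc : List String) (b : Option Int) (h : LoopInv acc b) :
    LoopInv (pieces.foldl stepA acc) (pieces.foldl stepB b) := by
  induction pieces generalizing acc b with
  | nil => exact h
  | cons p ps ih => exact ih _ _ (inv_step acc b p h)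

lemma not_mem_of_rank_lt {acc : List String} {r : Int} {t : String}
    (hall : ∀ s ∈ acc, (s = "Productivity" ∨ s = "Programming" ∨ s = "Crypto" ∨ s = "Tech") ∧ r ≤ catRank s)
    (ht : catRank t < r) : t ∉ acc := by
  intro hmem
  exact absurd (hall t hmem).2 (not_le.mpr ht)

lemma inv_sel (acc : List String) (b : Option Int) (h : LoopInv acc b) :
    selA acc = catOf b := by
  cases b with
  | none => simp only [LoopInv] at h; subst h; rfl
  | some r =>
    obtain ⟨⟨w, hw, hwcat, hwr⟩, hall⟩ := h
    unfold selA catOf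
    rcases hwcat with hc | hc | hc | hc <;> subst hc <;> rw [← hwr]
    · -- r = catRank "Productivity" = 0
      rw [if_pos (by simpa using hw)]
      rfl
    · -- r = 1: "Productivity" not in acc
      have h0 : "Productivity" ∉ acc :=
        not_mem_of_rank_lt (hwr ▸ hall) (by decide)
      rw [if_neg (by simpa using h0), if_pos (by simpa using hw)]
      rfl
    · -- r = 2
      have h0 : "Productivity" ∉ acc :=
        not_mem_of_rank_lt (hwr ▸ hall) (by decide)
      have h1 : "Programming" ∉ acc :=
        not_mem_of_rank_lt (hwr ▸ hall) (by decide)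
      rw [if_neg (by simpa using h0), if_neg (by simpa using h1),
        if_pos (by simpa using hw)]
      rfl
    · -- r = 3
      have h0 : "Productivity" ∉ acc :=
        not_mem_of_rank_lt (hwr ▸ hall) (by decide)
      have h1 : "Programming" ∉ acc :=
        not_mem_of_rank_lt (hwr ▸ hall) (by decide)
      have h2 : "Crypto" ∉ acc :=
        not_mem_of_rank_lt (hwr ▸ hall) (by decide)
      rw [if_neg (by simpa using h0), if_neg (by simpa using h1),
        if_neg (by simpa using h2), if_pos (by simpa using hw)]
      rfl

-- ===== VERDICT (by name: the statement is the Claim_ definition above) =====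
theorem change_tag_spec : Claim_equal_change_tag := by
  intro tags _
  unfold Spec_change_tag
  rw [change_tag_eq, change_tag_alt_eq]
  exact inv_sel _ _ (inv_fold _ [] none rfl)
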